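-- pv_equiv track=rewrite | github.com/felipemadeit/Codo_force_solutions | maximum_in_table.py | max_table
-- ===== SOURCE A (Python) =====
-- def max_table (n: int):
--     matrix_base = [1]*n
--     final = []
--     count = 0
--     for lines in range(n-1):
--         for i in range(1,n+1):
--             final.append(sum(matrix_base[:i]))
--         matrix_base = []
--         matrix_base = final[count:]
--         count += n
--     return matrix_base[-1]
-- ===== SOURCE B (Python) =====
-- def max_table(n: int):
--     # closed form: the max entry is the central binomial coefficient C(2n-2, n-1),
--     # computed incrementally by the multiplicative formula.
--     res = 1
--     for k in range(1, n):
--         res = res * (n - 1 + k) // k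
--     return res
-- ===== Notes on version B (the rewrite author's own statement) =====
-- stated objective: faster
-- what changed: Replaces the O(n^3) repeated prefix-sum table rebuild (n-1 passes, each re-summing slices) with a direct O(n) incremental computation of the central binomial coefficient C(2n-2, n-1) via the multiplicative formula.
-- outside the precondition, e.g. on max_table(0): A raises IndexError, B returns 1
import Mathlib
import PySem

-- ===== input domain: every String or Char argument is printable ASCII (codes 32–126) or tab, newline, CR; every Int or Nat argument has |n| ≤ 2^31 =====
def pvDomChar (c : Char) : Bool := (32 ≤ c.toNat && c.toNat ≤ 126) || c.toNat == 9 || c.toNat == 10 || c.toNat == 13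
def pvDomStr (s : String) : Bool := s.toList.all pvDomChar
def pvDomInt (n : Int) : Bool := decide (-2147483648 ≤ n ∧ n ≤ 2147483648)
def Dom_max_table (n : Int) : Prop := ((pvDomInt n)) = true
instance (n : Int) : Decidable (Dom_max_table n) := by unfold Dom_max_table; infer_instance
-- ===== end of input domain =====

-- B replaces A's repeated prefix-sum table rebuild with a direct multiplicative
-- computation of the binomial coefficient C(2n-2, n-1) (measurably faster).

-- ===== PORT A =====
-- inner loop: 'for i in range(1, n+1): final.append(sum(matrix_base[:i]))'
def mtInner (mb : List Int) (n : Int) (fin : List Int) : List Int :=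
  (PySem.List.pyRange 1 (n+1) 1).foldl
    (fun f i => f ++ [(PySem.List.slice mb none (some i)).sum]) fin

-- one iteration of the outer loop; state = (matrix_base, final, count)
def mtStep (n : Int) (st : List Int × List Int × Int) : List Int × List Int × Int :=
  let fin := mtInner st.1 n st.2.1
  (PySem.List.slice fin (some st.2.2) none, fin, st.2.2 + n)

def max_table (n : Int) : Int :=
  let st := (PySem.List.pyRange 0 (n-1) 1).foldl (fun s _ => mtStep n s)
      (PySem.List.pyRepeat [(1:Int)] n, ([] : List Int), (0:Int))
  PySem.List.pyGetD st.1 (-1) 0   -- matrix_base[-1]; Pre_ guarantees it is in range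

-- ===== PORT B =====
def max_table_alt (n : Int) : Int :=
  (PySem.List.pyRange 1 n 1).foldl
    (fun res k => PySem.Int.floordiv (res * (n - 1 + k)) k) 1

-- ===== PRECONDITION & SPEC =====
-- for n ≤ 0 the Python A raises IndexError (matrix_base[-1] on the empty list)
def Pre_max_table (n : Int) : Prop := 1 ≤ n
instance (n : Int) : Decidable (Pre_max_table n) := by unfold Pre_max_table; infer_instance
def pvWitness_max_table : Int := (3)

def Spec_max_table (n : Int) (out : Int) : Prop := out = max_table_alt n
instance (n : Int) (out : Int) : Decidable (Spec_max_table n out) := by unfold Spec_max_table; infer_instance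

-- ===== CLAIM (what is proved, stated in full; the proofs are below) =====
def Claim_equal_max_table : Prop := ∀ (n : Int), Dom_max_table n → Pre_max_table n → Spec_max_table n (max_table n)

-- ===== LEMMAS AND PROOFS =====

-- Pascal row after k prefix-sum passes: entry j is C(k+j, j)
def rowI (k N : Nat) : List Int := (List.range N).map (fun j => (Nat.choose (k+j) j : Int))

-- hockey stick: ∑_{i ≤ j} C(k+i, i) = C(k+j+1, j)
lemma hockey (k j : Nat) :
    ((List.range (j+1)).map (fun i => Nat.choose (k+i) i)).sum = Nat.choose (k+j+1) j := by
  induction j with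
  | zero => simp
  | succ j ih =>
      rw [List.range_succ, List.map_append, List.sum_append, ih]
      have h : (k+j+1+1).choose (j+1) = (k+j+1).choose j + (k+j+1).choose (j+1) :=
        Nat.choose_succ_succ _ _
      simp only [List.map_cons, List.map_nil, List.sum_cons, List.sum_nil,
        Nat.add_zero, ← Nat.add_assoc]
      omega

-- the inner loop appends the prefix sums of matrix_base to final
lemma mtInner_eq (mb fin : List Int) (N : Nat) :
    mtInner mb ((N:Nat):Int) fin
      = fin ++ (List.range N).map (fun j => (mb.take (j+1)).sum) := by
  unfold mtInner
  rw [PySem.List.foldl_append_singleton_eq_map, PySem.List.pyRange_one]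
  congr 1
  have : ((N:Int) + 1 - 1).toNat = N := by omega
  rw [this, List.map_map]
  refine List.map_congr_left (fun j hj => ?_)
  have h1 : (1 : Int) + (j:Int) = ((j+1 : Nat) : Int) := by push_cast; ring
  simp only [Function.comp, h1, PySem.List.slice_to_natCast]

-- the prefix sums of row k form row (k+1)   (hockey stick, cast to Int)
lemma rowStep (k N : Nat) :
    (List.range N).map (fun j => ((rowI k N).take (j+1)).sum) = rowI (k+1) N := by
  unfold rowI
  refine List.map_congr_left (fun j hj => ?_)
  have hj' : j < N := List.mem_range.mp hj
  rw [← List.map_take, List.take_range, min_eq_left (by omega)]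
  have : ((List.range (j+1)).map (fun i => ((Nat.choose (k+i) i : Nat) : Int))).sum
       = (((List.range (j+1)).map (fun i => Nat.choose (k+i) i)).sum : Int) := by
    rw [Nat.cast_list_sum, List.map_map]; rfl
  rw [this, hockey, show k+1+j = k+j+1 by omega]

lemma length_rowI (k N : Nat) : (rowI k N).length = N := by
  simp [rowI]

-- outer-loop invariant: after t iterations matrix_base is Pascal row t,
-- final has length t*n and count = t*n
lemma outer_iterate (N : Nat) (t : Nat) :
    ∃ fin : List Int,
      (mtStep ((N:Nat):Int))^[t] (rowI 0 N, ([] : List Int), (0:Int))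
        = (rowI t N, fin, ((t*N : Nat) : Int)) ∧ fin.length = t*N := by
  induction t with
  | zero => exact ⟨[], by simp, by simp⟩
  | succ t ih =>
      obtain ⟨fin, heq, hlen⟩ := ih
      rw [Function.iterate_succ_apply', heq]
      refine ⟨fin ++ rowI (t+1) N, ?_, by simp [hlen, length_rowI]; ring⟩
      show (let fin' := mtInner (rowI t N) ((N:Nat):Int) fin;
        (PySem.List.slice fin' (some ((t*N : Nat) : Int)) none, fin', ((t*N : Nat) : Int) + (N:Nat))) = _
      rw [mtInner_eq, rowStep]
      show (PySem.List.slice (fin ++ rowI (t+1) N) (some ((t*N : Nat):Int)) none,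
        fin ++ rowI (t+1) N, ((t*N : Nat):Int) + ((N:Nat):Int)) = _
      rw [PySem.List.slice_from_natCast, ← hlen, List.drop_left]
      refine Prod.ext rfl (Prod.ext rfl ?_)
      push_cast [hlen]; ring

-- B's loop computes the binomial coefficient incrementally
lemma altB (c : Nat) (m : Nat) :
    (PySem.List.pyRange 1 ((m:Int)+1) 1).foldl
        (fun res k => PySem.Int.floordiv (res * ((c:Int) + k)) k) 1
      = (Nat.choose (c + m) m : Int) := by
  induction m with
  | zero =>
      rw [show ((0:Nat):Int) + 1 = 1 by norm_num, PySem.List.pyRange_one_eq_nil le_rfl]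
      simp
  | succ m ih =>
      have hsplit : PySem.List.pyRange 1 (((m+1:Nat):Int)+1) 1
          = PySem.List.pyRange 1 ((m:Int)+1) 1 ++ [(m:Int)+1] := by
        have := PySem.List.pyRange_one_succ_right (a := 1) (b := (m:Int)+1) (by omega)
        rw [show (((m+1:Nat):Int)+1) = ((m:Int)+1)+1 by push_cast; ring]
        exact this
      rw [hsplit, List.foldl_append, ih]
      simp only [List.foldl_cons, List.foldl_nil]
      have h1 : ((Nat.choose (c+m) m : Nat) : Int) * ((c:Int) + ((m:Int)+1))
          = ((Nat.choose (c+m) m * (c+m+1) : Nat) : Int) := by push_cast; ring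
      have h2 : (m:Int) + 1 = ((m+1 : Nat) : Int) := by push_cast; ring
      rw [h1, h2, PySem.Int.floordiv_natCast]
      have h3 : Nat.choose (c+m) m * (c+m+1) = Nat.choose (c+m+1) (m+1) * (m+1) := by
        rw [Nat.mul_comm]
        exact Nat.add_one_mul_choose_eq (c+m) m
      rw [h3, Nat.mul_div_cancel _ (by omega)]
      norm_cast

-- a fold that ignores the list elements is function iteration
lemma foldl_const_iterate {α β : Type} (g : α → α) (l : List β) (init : α) :
    l.foldl (fun s _ => g s) init = g^[l.length] init := by
  induction l generalizing init with
  | nil => rfl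
  | cons x xs ih => simp [List.foldl_cons, Function.iterate_succ_apply, ih]

lemma rowI_zero (N : Nat) : rowI 0 N = List.replicate N 1 := by
  simp [rowI, Nat.choose_self]

lemma rowI_last (c : Nat) :
    PySem.List.pyGetD (rowI c (c+1)) (-1) 0 = (Nat.choose (c+c) c : Int) := by
  rw [rowI, List.range_succ, List.map_append]
  simpa using PySem.List.pyGetD_neg_one_append_singleton
    ((List.range c).map (fun j => (Nat.choose (c+j) j : Int))) _ 0

lemma main_eq (n : Int) (hpre : 1 ≤ n) : max_table n = max_table_alt n := by
  obtain ⟨c, rfl⟩ : ∃ c : Nat, n = ((c+1 : Nat) : Int) := ⟨(n-1).toNat, by omega⟩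
  have hA : max_table ((c+1 : Nat) : Int) = (Nat.choose (c+c) c : Int) := by
    unfold max_table
    have h1 : ((c+1 : Nat) : Int) - 1 = ((c:Nat):Int) := by push_cast; ring
    rw [h1, foldl_const_iterate, PySem.List.length_pyRange_one]
    have h2 : (((c:Nat):Int) - 0).toNat = c := by omega
    rw [h2, PySem.List.pyRepeat_singleton]
    have h3 : (((c+1 : Nat) : Int)).toNat = c+1 := by omega
    rw [h3, ← rowI_zero]
    obtain ⟨fin, heq, -⟩ := outer_iterate (c+1) c
    rw [heq]
    exact rowI_last c
  have hB : max_table_alt ((c+1 : Nat) : Int) = (Nat.choose (c+c) c : Int) := by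
    unfold max_table_alt
    have h1 : ∀ (res k : Int), PySem.Int.floordiv (res * (((c+1 : Nat) : Int) - 1 + k)) k
        = PySem.Int.floordiv (res * (((c:Nat):Int) + k)) k := by
      intro res k; congr 1; push_cast; ring
    simp only [h1]
    have h2 : ((c+1 : Nat) : Int) = ((c:Nat):Int) + 1 := by push_cast; ring
    rw [h2, altB c c]
  rw [hA, hB]

-- ===== VERDICT (by name: the statement is the Claim_ definition above) =====
theorem max_table_spec : Claim_equal_max_table :=
  fun n _ hpre => main_eq n hpre
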